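-- pv_equiv track=rewrite | github.com/mariovmelo/agent-skills | src/uai/cli/edit_applier.py | _split_hunks
-- ===== SOURCE A (Python) =====
-- def _split_hunks(diff_body: str) -> list[str]:
--     """Split a diff body into individual @@ hunk strings."""
--     lines = diff_body.splitlines(keepends=True)
--     hunks: list[str] = []
--     current: list[str] = []
--     for line in lines:
--         if line.startswith("@@") and current:
--             hunks.append("".join(current))
--             current = []
--         current.append(line)
--     if current:
--         hunks.append("".join(current))
--     return hunks
-- ===== SOURCE B (Python) =====
-- def _split_hunks(diff_body: str) -> list[str]:
--     """Split a diff body into individual @@ hunk strings."""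
--     lines = diff_body.splitlines(keepends=True)
--     if not lines:
--         return []
--     cuts = [0] + [i for i in range(1, len(lines)) if lines[i].startswith("@@")] + [len(lines)]
--     return ["".join(lines[a:b]) for a, b in zip(cuts, cuts[1:])]
-- ===== Notes on version B (the rewrite author's own statement) =====
-- stated objective: alternative
-- what changed: Replaced the streaming accumulate-and-flush loop with a one-pass collection of @@ boundary indices followed by slicing the line list at consecutive cut points and joining each slice.
import Mathlib
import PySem

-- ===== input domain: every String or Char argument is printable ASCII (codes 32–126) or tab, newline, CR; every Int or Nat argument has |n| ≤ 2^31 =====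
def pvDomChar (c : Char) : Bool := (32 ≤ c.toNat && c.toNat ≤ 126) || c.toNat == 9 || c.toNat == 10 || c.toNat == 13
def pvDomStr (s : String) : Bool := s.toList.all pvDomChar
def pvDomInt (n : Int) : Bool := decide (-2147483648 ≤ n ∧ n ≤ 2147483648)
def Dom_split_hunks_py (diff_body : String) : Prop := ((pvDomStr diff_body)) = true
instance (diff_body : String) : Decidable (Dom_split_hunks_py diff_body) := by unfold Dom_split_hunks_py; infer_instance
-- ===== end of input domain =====

-- B replaces A's streaming accumulate-and-flush loop by collecting the @@ boundary
-- indices in one pass and slicing the line list at consecutive cut points (objective: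
-- alternative decomposition, same cost).

-- Shared helper: str.splitlines(keepends=True), ported by hand over List Char.
-- Exact on Dom: the only characters Dom admits are printable ASCII, tab, '\n', '\r',
-- so the only line boundaries Python would see are '\n', '\r' and '\r\n'
-- (the extra boundaries '\v', '\f', '\x1c'.., '\x85', '\u2028'.. cannot occur).
def splitlinesKeep : List Char → List (List Char)
  | [] => []
  | '\n' :: cs => ['\n'] :: splitlinesKeep cs
  | '\r' :: '\n' :: cs => ['\r', '\n'] :: splitlinesKeep cs
  | '\r' :: cs => ['\r'] :: splitlinesKeep cs
  | c :: cs =>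
    match splitlinesKeep cs with
    | [] => [[c]]
    | l :: ls => (c :: l) :: ls

-- ===== PORT A =====
-- A's for-loop over the lines, as structural recursion over the same state
-- (hunks, current); lines and hunks are kept as List Char ("".join = List.flatten,
-- exact), String.mk is applied to the result at the end.
def split_hunks_loop (lines : List (List Char)) (hunks : List (List Char))
    (current : List (List Char)) : List (List Char) :=
  match lines with
  | [] => if current.isEmpty then hunks else hunks ++ [current.flatten]
  | line :: rest =>
    if PySem.Chars.startswith line ['@', '@'] && !current.isEmpty then
      split_hunks_loop rest (hunks ++ [current.flatten]) [line]
    else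
      split_hunks_loop rest hunks (current ++ [line])

def split_hunks_py (diff_body : String) : List String :=
  (split_hunks_loop (splitlinesKeep diff_body.toList) [] []).map String.mk

-- ===== PORT B =====
-- Source B: boundary indices via range(1, len(lines)), cut points, then slicing;
-- lines[a:b] with 0 ≤ a, b ≤ len is exactly (drop a).take (b - a).
def split_hunks_py_alt (diff_body : String) : List String :=
  let lines := splitlinesKeep diff_body.toList
  match lines with
  | [] => []
  | _ =>
    let n := lines.length
    let cuts := 0 :: ((List.range' 1 (n - 1)).filter
        (fun i => PySem.Chars.startswith (lines.getD i []) ['@', '@']) ++ [n])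
    (cuts.zip cuts.tail).map
      (fun ab => String.mk ((lines.drop ab.1).take (ab.2 - ab.1)).flatten)

-- ===== PRECONDITION & SPEC =====
def Spec_split_hunks_py (diff_body : String) (out : List String) : Prop := out = split_hunks_py_alt diff_body
instance (diff_body : String) (out : List String) : Decidable (Spec_split_hunks_py diff_body out) := by unfold Spec_split_hunks_py; infer_instance

-- ===== CLAIM (what is proved, stated in full; the proofs are below) =====
def Claim_equal_split_hunks_py : Prop := ∀ (diff_body : String), Dom_split_hunks_py diff_body → Spec_split_hunks_py diff_body (split_hunks_py diff_body)

-- ===== LEMMAS AND PROOFS =====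

-- Reference grouping: groups of `cur ++ ys` starting a new group at each element of
-- ys satisfying p; cur (nonempty) opens the first group.
def chunksC {α : Type} (p : α → Bool) (cur : List α) : List α → List (List α)
  | [] => [cur]
  | y :: ys => if p y then cur :: chunksC p [y] ys else chunksC p (cur ++ [y]) ys

-- positions of elements satisfying p
def allB {α : Type} (p : α → Bool) : List α → List Nat
  | [] => []
  | y :: ys => (if p y then [0] else []) ++ (allB p ys).map (· + 1)

-- segments of L between consecutive cut points
def segsOf {α : Type} (L : List α) (cuts : List Nat) : List (List α) :=
  (cuts.zip cuts.tail).map (fun ab => (L.drop ab.1).take (ab.2 - ab.1))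

theorem segsOf_shift {α : Type} (pre L : List α) (cuts : List Nat) :
    segsOf (pre ++ L) (cuts.map (pre.length + ·)) = segsOf L cuts := by
  unfold segsOf
  rw [show (cuts.map (pre.length + ·)).tail = cuts.tail.map (pre.length + ·) from
    by cases cuts <;> simp]
  rw [List.zip_map]
  simp only [List.map_map]
  refine List.map_congr_left (fun ab _ => ?_)
  rcases ab with ⟨a, b⟩
  show ((pre ++ L).drop (pre.length + a)).take (pre.length + b - (pre.length + a))
      = (L.drop a).take (b - a)
  rw [List.drop_length_add_append, Nat.add_sub_add_left]

theorem filter_range_eq_allB {α : Type} (p : α → Bool) (d : α) (ys : List α) :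
    (List.range ys.length).filter (fun j => p (ys.getD j d)) = allB p ys := by
  induction ys with
  | nil => simp [allB]
  | cons y ys ih =>
    rw [List.length_cons, List.range_succ_eq_map]
    simp only [List.filter_cons, List.filter_map, allB]
    rw [show (List.filter ((fun j => p ((y :: ys).getD j d)) ∘ (· + 1)) (List.range ys.length))
        = (List.range ys.length).filter (fun j => p (ys.getD j d)) from by
      refine List.filter_congr (fun j _ => ?_); simp [Function.comp]]
    rw [ih]
    by_cases h : p y <;> simp [h]

theorem loop_eq (hunks cur : List (List Char)) (lines : List (List Char)) (h : cur ≠ []) :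
    split_hunks_loop lines hunks cur
      = hunks ++ (chunksC (fun l => PySem.Chars.startswith l ['@', '@']) cur lines).map List.flatten := by
  induction lines generalizing hunks cur with
  | nil => simp [split_hunks_loop, chunksC, List.isEmpty_iff, h]
  | cons line rest ih =>
    rw [split_hunks_loop, chunksC]
    by_cases hp : PySem.Chars.startswith line ['@', '@']
    · rw [if_pos hp,
        show (PySem.Chars.startswith line ['@', '@'] && !cur.isEmpty) = true from by
          simp [hp, h],
        if_pos rfl, ih _ _ (by simp)]
      simp
    · rw [if_neg hp,
        show (PySem.Chars.startswith line ['@', '@'] && !cur.isEmpty) = false from by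
          simp [hp],
        if_neg (by simp)]
      exact ih _ _ (by simp)

theorem segs_eq_chunksC {α : Type} (p : α → Bool) (ys : List α) :
    ∀ cur : List α, cur ≠ [] →
    segsOf (cur ++ ys) (0 :: ((allB p ys).map (cur.length + ·) ++ [cur.length + ys.length]))
      = chunksC p cur ys := by
  induction ys with
  | nil =>
    intro cur h
    simp [allB, segsOf, chunksC]
  | cons y ys ih =>
    intro cur h
    rw [chunksC]
    by_cases hp : p y
    · rw [if_pos hp]
      have hall : allB p (y :: ys) = 0 :: (allB p ys).map (· + 1) := by simp [allB, hp]
      rw [hall]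
      -- peel the first segment (0, cur.length)
      have : segsOf (cur ++ y :: ys)
          (0 :: ((0 :: (allB p ys).map (· + 1)).map (cur.length + ·) ++ [cur.length + (y :: ys).length]))
          = cur :: segsOf (cur ++ y :: ys)
              (((0 :: ((allB p ys).map (· + 1) ++ [1 + ys.length])).map (cur.length + ·))) := by
        simp only [List.map_cons, List.map_append, Nat.add_zero, List.length_cons]
        unfold segsOf
        simp only [List.tail_cons]
        rw [show cur.length + (ys.length + 1) = cur.length + (1 + ys.length) from by omega]
        simp
      rw [this, segsOf_shift cur (y :: ys)]
      rw [show ((allB p ys).map (· + 1) ++ [1 + ys.length])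
          = ((allB p ys).map ([y].length + ·) ++ [[y].length + ys.length]) from by
        simp [Nat.add_comm]]
      rw [show (y :: ys : List α) = [y] ++ ys from rfl] at *
      rw [ih [y] (by simp)]
    · rw [if_neg hp]
      have hall : allB p (y :: ys) = (allB p ys).map (· + 1) := by simp [allB, hp]
      rw [hall]
      have hmap : ((allB p ys).map (· + 1)).map (cur.length + ·)
          = (allB p ys).map ((cur ++ [y]).length + ·) := by
        rw [List.map_map]
        refine List.map_congr_left (fun j _ => ?_)
        simp [Function.comp]
        omega
      rw [hmap]
      rw [show cur.length + (y :: ys).length = (cur ++ [y]).length + ys.length from by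
        simp; omega]
      rw [show cur ++ y :: ys = (cur ++ [y]) ++ ys from by simp]
      exact ih (cur ++ [y]) (by simp)

-- ===== VERDICT (by name: the statement is the Claim_ definition above) =====
theorem split_hunks_py_spec : Claim_equal_split_hunks_py := by
  intro diff_body _
  unfold Spec_split_hunks_py split_hunks_py split_hunks_py_alt
  cases hl : splitlinesKeep diff_body.toList with
  | nil => simp [split_hunks_loop]
  | cons x xs =>
    set p : List Char → Bool := fun l => PySem.Chars.startswith l ['@', '@'] with hpdef
    -- A side: first iteration has empty current, so the flush branch cannot fire
    have hA : split_hunks_loop (x :: xs) [] []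
        = (chunksC p [x] xs).map List.flatten := by
      rw [split_hunks_loop,
        show (PySem.Chars.startswith x ['@', '@'] && !(List.isEmpty [])) = false from by simp,
        if_neg (by simp), List.nil_append, loop_eq [] [x] xs (by simp), List.nil_append]
    -- B side: boundary indices are the positions of p in xs, shifted by one
    have hfilt : (List.range' 1 ((x :: xs).length - 1)).filter
          (fun i => p ((x :: xs).getD i []))
        = (allB p xs).map (1 + ·) := by
      rw [List.length_cons, Nat.add_sub_cancel, List.range'_eq_map_range, List.filter_map]
      rw [show List.filter ((fun i => p ((x :: xs).getD i [])) ∘ (1 + ·)) (List.range xs.length)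
          = (List.range xs.length).filter (fun j => p (xs.getD j [])) from by
        refine List.filter_congr (fun j _ => ?_)
        simp [Function.comp, Nat.add_comm 1 j]]
      rw [filter_range_eq_allB p [] xs]
    have hB : segsOf (x :: xs)
          (0 :: ((List.range' 1 ((x :: xs).length - 1)).filter
            (fun i => p ((x :: xs).getD i [])) ++ [(x :: xs).length]))
        = chunksC p [x] xs := by
      rw [hfilt]
      rw [show (allB p xs).map (1 + ·) = (allB p xs).map ([x].length + ·) from by simp]
      rw [show (x :: xs).length = [x].length + xs.length from by simp [Nat.add_comm]]
      exact segs_eq_chunksC p xs [x] (by simp)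
    rw [hA]
    simp only
    rw [show ((0 :: ((List.range' 1 ((x :: xs).length - 1)).filter
          (fun i => p ((x :: xs).getD i [])) ++ [(x :: xs).length])).zip
          (0 :: ((List.range' 1 ((x :: xs).length - 1)).filter
            (fun i => p ((x :: xs).getD i [])) ++ [(x :: xs).length])).tail).map
          (fun ab => String.mk (((x :: xs).drop ab.1).take (ab.2 - ab.1)).flatten)
        = (segsOf (x :: xs)
            (0 :: ((List.range' 1 ((x :: xs).length - 1)).filter
              (fun i => p ((x :: xs).getD i [])) ++ [(x :: xs).length]))).map
            (fun g => String.mk g.flatten) from by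
      unfold segsOf; simp [List.map_map, Function.comp]]
    rw [hB]
    simp
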